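-- pv_equiv track=rewrite | github.com/garciaha/DE_daily_challenges | 2020-07-19/vowel.py | nearest_vowel
-- ===== SOURCE A (Python) =====
-- def nearest_vowel(word):
--     vowel = ["a", "e", "i", "o", "u"]
--     result = [0 if x in vowel else "X" for x in word]
--     vowels = [x for x in range(len(result)) if result[x] == 0]
--     for x in range(len(result)):
--         if x not in vowels:
--             result[x] = min([abs(x - y) for y in vowels])
--     return result
-- ===== SOURCE B (Python) =====
-- def nearest_vowel(word):
--     vowels = {"a", "e", "i", "o", "u"}
--     n = len(word)
--     fwd = []
--     d = n
--     for c in word: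
--         d = 0 if c in vowels else d + 1
--         fwd.append(d)
--     bwd = []
--     d = n
--     for c in reversed(word):
--         d = 0 if c in vowels else d + 1
--         bwd.append(d)
--     bwd.reverse()
--     return [min(f, b) for f, b in zip(fwd, bwd)]
-- ===== Notes on version B (the rewrite author's own statement) =====
-- stated objective: faster
-- what changed: Replaced the per-index scan over all vowel positions (min of |x-y| for every vowel y) by two linear sweeps that carry the running distance to the nearest vowel on the left and on the right, combined pointwise with min.
import Mathlib
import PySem

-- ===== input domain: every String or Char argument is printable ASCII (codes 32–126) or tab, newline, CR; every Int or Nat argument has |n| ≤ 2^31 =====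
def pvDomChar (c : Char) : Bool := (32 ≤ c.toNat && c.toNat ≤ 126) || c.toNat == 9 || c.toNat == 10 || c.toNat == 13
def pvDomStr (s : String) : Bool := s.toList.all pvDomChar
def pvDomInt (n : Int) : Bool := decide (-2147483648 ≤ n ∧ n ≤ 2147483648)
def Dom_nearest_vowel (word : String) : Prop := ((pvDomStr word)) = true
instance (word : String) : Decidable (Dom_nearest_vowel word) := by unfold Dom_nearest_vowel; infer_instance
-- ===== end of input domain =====

-- B replaces A's quadratic per-index scan over all vowel positions by two linear
-- nearest-vowel sweeps (left distance, right distance) combined pointwise with min.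

-- ===== PORT A =====
def vowelA : List Char := ['a', 'e', 'i', 'o', 'u']

def nearest_vowel (word : String) : List Int :=
  -- result = [0 if x in vowel else "X" for x in word]   (the string "X" is rendered as none)
  let result : List (Option Int) := word.toList.map (fun x => if vowelA.contains x then some 0 else none)
  -- vowels = [x for x in range(len(result)) if result[x] == 0]
  let vowels : List Nat := (List.range result.length).filter (fun x => result[x]? == some (some 0))
  -- for x in range(len(result)): if x not in vowels: result[x] = min([abs(x - y) for y in vowels])
  -- (Python's min of the empty list raises ValueError; those inputs are excluded by Pre_, so .getD 0 is unreachable there)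
  (List.range result.length).map (fun (x : Nat) =>
    if vowels.contains x then (0 : Int)
    else (PySem.List.min? (vowels.map (fun (y : Nat) => |(x : Int) - (y : Int)|)) (fun v => v)).getD 0)

-- ===== PORT B =====
def vowelSetB : PySem.Set Char := PySem.Set.ofList ['a', 'e', 'i', 'o', 'u']

-- the forward/backward loop of Source B: carry d (distance since the last vowel seen), emit it at each char
def sweep : List Char → Int → List Int
  | [], _ => []
  | c :: t, d =>
    let d' : Int := if vowelSetB.contains c then 0 else d + 1
    d' :: sweep t d'

def nearest_vowel_alt (word : String) : List Int :=
  let cs := word.toList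
  let n : Int := cs.length
  let fwd := sweep cs n
  let bwd := (sweep cs.reverse n).reverse
  List.zipWith min fwd bwd

-- ===== PRECONDITION & SPEC =====
-- Pre_ excludes exactly the nonempty words containing no vowel: there A's min([]) raises ValueError.
def Pre_nearest_vowel (word : String) : Prop :=
  word.toList = [] ∨ word.toList.any (fun c => vowelA.contains c) = true
instance (word : String) : Decidable (Pre_nearest_vowel word) := by unfold Pre_nearest_vowel; infer_instance
def pvWitness_nearest_vowel : String := "hello"

def Spec_nearest_vowel (word : String) (out : List Int) : Prop := out = nearest_vowel_alt word
instance (word : String) (out : List Int) : Decidable (Spec_nearest_vowel word out) := by unfold Spec_nearest_vowel; infer_instance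

-- ===== CLAIM (what is proved, stated in full; the proofs are below) =====
def Claim_equal_nearest_vowel : Prop := ∀ (word : String), Dom_nearest_vowel word → Pre_nearest_vowel word → Spec_nearest_vowel word (nearest_vowel word)

-- ===== LEMMAS AND PROOFS =====

lemma vowelSetB_eq : vowelSetB = vowelA := by decide

lemma sweep_length (cs : List Char) (d : Int) : (sweep cs d).length = cs.length := by
  induction cs generalizing d with
  | nil => simp [sweep]
  | cons c t ih => simp [sweep, ih]

/-- Characterisation of the sweep: the i-th entry is the distance to the nearest
vowel at an index ≤ i, or `d + i + 1` if there is none. -/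
lemma sweep_spec (cs : List Char) (d : Int) (i : Nat) (hi : i < cs.length) :
    (∀ j, j ≤ i → cs[j]! ∈ vowelA → (sweep cs d)[i]! ≤ (i : Int) - (j : Int)) ∧
    ((∃ j, j ≤ i ∧ cs[j]! ∈ vowelA ∧ (sweep cs d)[i]! = (i : Int) - (j : Int)) ∨
     ((sweep cs d)[i]! = d + (i : Int) + 1 ∧ ∀ j, j ≤ i → cs[j]! ∉ vowelA)) := by
  induction cs generalizing d i with
  | nil => simp at hi
  | cons c t ih =>
    cases i with
    | zero =>
      by_cases hc : c ∈ vowelA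
      · refine ⟨?_, Or.inl ⟨0, le_refl 0, by simpa using hc, by simp [sweep, vowelSetB_eq, hc]⟩⟩
        intro j hj hv
        have hj0 : j = 0 := Nat.le_zero.mp hj
        subst hj0
        simp [sweep, vowelSetB_eq, hc]
      · constructor
        · intro j hj hv
          have hj0 : j = 0 := Nat.le_zero.mp hj
          subst hj0
          simp at hv
          exact absurd hv hc
        · refine Or.inr ⟨by simp [sweep, vowelSetB_eq, hc], ?_⟩
          intro j hj
          have hj0 : j = 0 := Nat.le_zero.mp hj
          subst hj0
          simpa using hc
    | succ i =>
      have hi' : i < t.length := by simpa using Nat.lt_of_succ_lt_succ hi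
      by_cases hc : c ∈ vowelA
      · -- d' = 0
        have hval : (sweep (c :: t) d)[i + 1]! = (sweep t 0)[i]! := by
          simp [sweep, vowelSetB_eq, hc]
        obtain ⟨ih1, ih2⟩ := ih 0 i hi'
        constructor
        · intro j hj hv
          cases j with
          | zero =>
            rcases ih2 with ⟨j', hj', _, he⟩ | ⟨he, _⟩
            · rw [hval, he]; push_cast; omega
            · rw [hval, he]; push_cast; omega
          | succ k =>
            have hk : k ≤ i := Nat.le_of_succ_le_succ hj
            have hv' : t[k]! ∈ vowelA := by simpa using hv
            have := ih1 k hk hv'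
            rw [hval]; push_cast at this ⊢; omega
        · rcases ih2 with ⟨j, hj, hv, he⟩ | ⟨he, _⟩
          · exact Or.inl ⟨j + 1, Nat.succ_le_succ hj, by simpa using hv,
              by rw [hval, he]; push_cast; omega⟩
          · exact Or.inl ⟨0, Nat.zero_le _, by simpa using hc,
              by rw [hval, he]; push_cast; omega⟩
      · -- d' = d + 1
        have hval : (sweep (c :: t) d)[i + 1]! = (sweep t (d + 1))[i]! := by
          simp [sweep, vowelSetB_eq, hc]
        obtain ⟨ih1, ih2⟩ := ih (d + 1) i hi'
        constructor
        · intro j hj hv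
          cases j with
          | zero =>
            exact absurd (by simpa using hv) hc
          | succ k =>
            have hk : k ≤ i := Nat.le_of_succ_le_succ hj
            have hv' : t[k]! ∈ vowelA := by simpa using hv
            have := ih1 k hk hv'
            rw [hval]; push_cast at this ⊢; omega
        · rcases ih2 with ⟨j, hj, hv, he⟩ | ⟨he, hall⟩
          · exact Or.inl ⟨j + 1, Nat.succ_le_succ hj, by simpa using hv,
              by rw [hval, he]; push_cast; omega⟩
          · refine Or.inr ⟨by rw [hval, he]; push_cast; omega, ?_⟩
            intro j hj
            cases j with
            | zero => simpa using hc
            | succ k => simpa using hall k (Nat.le_of_succ_le_succ hj)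


/-- The backward sweep of Source B, read at index i of the re-reversed list:
distance to the nearest vowel at an index ≥ i, or at least d + 1 if there is none. -/
lemma sweep_rev_spec (cs : List Char) (d : Int) (i : Nat) (hi : i < cs.length) :
    (∀ y, i ≤ y → y < cs.length → cs[y]! ∈ vowelA → ((sweep cs.reverse d).reverse)[i]! ≤ (y : Int) - (i : Int)) ∧
    ((∃ y, i ≤ y ∧ y < cs.length ∧ cs[y]! ∈ vowelA ∧ ((sweep cs.reverse d).reverse)[i]! = (y : Int) - (i : Int)) ∨
     (d + 1 ≤ ((sweep cs.reverse d).reverse)[i]! ∧ ∀ y, i ≤ y → y < cs.length → cs[y]! ∉ vowelA)) := by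
  have hlen : (sweep cs.reverse d).length = cs.length := by simp [sweep_length]
  have hi2 : cs.length - 1 - i < cs.length := by omega
  have hrev : ((sweep cs.reverse d).reverse)[i]! = (sweep cs.reverse d)[cs.length - 1 - i]! := by
    rw [getElem!_pos _ i (by simp [hlen]; omega), getElem!_pos _ _ (by omega),
      List.getElem_reverse]
    congr 1
    omega
  have hcrev : ∀ j, j < cs.length → (cs.reverse)[j]! = cs[cs.length - 1 - j]! := by
    intro j hj
    rw [getElem!_pos _ j (by simp; omega), getElem!_pos _ _ (by omega), List.getElem_reverse]
  obtain ⟨h1, h2⟩ := sweep_spec cs.reverse d (cs.length - 1 - i) (by simp; omega)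
  constructor
  · intro y hiy hy hv
    have hj : cs.length - 1 - y ≤ cs.length - 1 - i := by omega
    have hv' : (cs.reverse)[cs.length - 1 - y]! ∈ vowelA := by
      rw [hcrev _ (by omega)]
      have hyy : cs.length - 1 - (cs.length - 1 - y) = y := by omega
      rw [hyy]; exact hv
    have := h1 (cs.length - 1 - y) hj hv'
    rw [hrev]
    omega
  · rcases h2 with ⟨j, hj, hv, he⟩ | ⟨he, hall⟩
    · refine Or.inl ⟨cs.length - 1 - j, by omega, by omega, ?_, by rw [hrev, he]; omega⟩
      rw [← hcrev j (by omega)]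
      exact hv
    · refine Or.inr ⟨by rw [hrev]; omega, ?_⟩
      intro y hiy hy hv
      exact hall (cs.length - 1 - y) (by omega)
        (by rw [hcrev _ (by omega)]
            have hyy : cs.length - 1 - (cs.length - 1 - y) = y := by omega
            rw [hyy]; exact hv)

/-- Port A, rewritten with the vowel test evaluated through the intermediate result list. -/
lemma A_simp (word : String) :
    nearest_vowel word =
      (List.range word.toList.length).map (fun (x : Nat) =>
        if word.toList[x]! ∈ vowelA then (0 : Int)
        else (PySem.List.min?
          (((List.range word.toList.length).filter (fun y => decide (word.toList[y]! ∈ vowelA))).map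
            (fun (y : Nat) => |(x : Int) - (y : Int)|)) (fun v => v)).getD 0) := by
  have hflt : (List.range word.toList.length).filter
      (fun x => (word.toList.map (fun x => if vowelA.contains x then some (0:Int) else none))[x]? == some (some 0))
      = (List.range word.toList.length).filter (fun y => decide (word.toList[y]! ∈ vowelA)) := by
    apply List.filter_congr
    intro x hx
    have hx' : x < word.toList.length := List.mem_range.mp hx
    simp only [List.getElem?_map, List.getElem?_eq_getElem hx',
      getElem!_pos word.toList x hx', Option.map_some]
    by_cases h : word.toList[x] ∈ vowelA <;> simp [h]
  simp only [nearest_vowel, List.length_map]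
  rw [hflt]
  apply List.map_congr_left
  intro x hx
  have hx' : x < word.toList.length := List.mem_range.mp hx
  rw [getElem!_pos word.toList x hx']
  have hcont : ((List.range word.toList.length).filter (fun y => decide (word.toList[y]! ∈ vowelA))).contains x
      = decide (word.toList[x] ∈ vowelA) := by
    have hx'' : x < word.length := by simpa using hx'
    by_cases hxv : word.toList[x] ∈ vowelA
    · simp [List.mem_filter, List.mem_range, hx'', List.getElem?_eq_getElem hx', hxv]
    · simp [List.mem_filter, List.getElem?_eq_getElem hx', hxv]
      exact fun _ => hx''
  rw [hcont]
  by_cases hxv : word.toList[x] ∈ vowelA <;> simp [hxv]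

theorem nearest_vowel_spec : Claim_equal_nearest_vowel := by
  intro word _ hpre
  unfold Spec_nearest_vowel
  rcases hpre with hemp | hany
  · simp [A_simp, nearest_vowel_alt, hemp, sweep]
  · -- there is a vowel at some index k
    rw [List.any_eq_true] at hany
    obtain ⟨c, hcmem, hcv⟩ := hany
    obtain ⟨k, hk, hck⟩ := List.mem_iff_getElem.mp hcmem
    have hkv : word.toList[k]! ∈ vowelA := by
      rw [getElem!_pos word.toList k hk, hck]; simpa using hcv
    apply List.ext_getElem
    · simp [A_simp, nearest_vowel_alt, sweep_length]
    · intro i h1 h2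
      have hin : i < word.toList.length := by simpa [A_simp] using h1
      have hA := List.getElem_of_eq (A_simp word) h1
      rw [hA, List.getElem_map, List.getElem_range]
      have hB : (nearest_vowel_alt word)[i]'h2 =
          min ((sweep word.toList ((word.toList.length : Int)))[i]!)
              (((sweep word.toList.reverse ((word.toList.length : Int))).reverse)[i]!) := by
        simp only [nearest_vowel_alt]
        rw [List.getElem_zipWith]
        rw [getElem!_pos _ i (by rw [sweep_length]; exact hin),
            getElem!_pos _ i (by rw [List.length_reverse, sweep_length, List.length_reverse]; exact hin)]
      rw [hB]
      obtain ⟨f1, f2⟩ := sweep_spec word.toList ((word.toList.length : Int)) i hin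
      obtain ⟨b1, b2⟩ := sweep_rev_spec word.toList ((word.toList.length : Int)) i hin
      set cs := word.toList with hcsdef
      set n := cs.length with hndef
      set fa := (sweep cs ((n : Int)))[i]! with hfadef
      set bb := ((sweep cs.reverse ((n : Int))).reverse)[i]! with hbbdef
      by_cases hvi : cs[i]! ∈ vowelA
      · -- a vowel position: A writes 0, both sweeps give 0 at i
        have hfa_le : fa ≤ 0 := by have := f1 i le_rfl hvi; omega
        have hfa_ge : 0 ≤ fa := by
          rcases f2 with ⟨j, hj, _, he⟩ | ⟨he, _⟩ <;> omega
        have hbb_ge : 0 ≤ bb := by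
          rcases b2 with ⟨y, hy1, hy2, _, he⟩ | ⟨he, _⟩ <;> omega
        simp only [hvi, if_pos]
        omega
      · simp only [hvi, if_neg, not_false_iff]
        -- the vowel set V and the distances A minimises over
        have hkv' : cs[k] ∈ vowelA := by rwa [getElem!_pos cs k hk] at hkv
        have hkV : k ∈ (List.range n).filter (fun y => decide (cs[y]! ∈ vowelA)) := by
          simp [List.mem_filter, hk, List.getElem?_eq_getElem hk, hkv']
        have hmapne : (((List.range n).filter (fun y => decide (cs[y]! ∈ vowelA))).map
            (fun (y : Nat) => |(i : Int) - (y : Int)|)) ≠ [] := by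
          simp only [ne_eq, List.map_eq_nil_iff]
          intro hnil
          rw [hnil] at hkV
          simp at hkV
        obtain ⟨m0, hm0⟩ : ∃ m0, PySem.List.min? (((List.range n).filter (fun y => decide (cs[y]! ∈ vowelA))).map
            (fun (y : Nat) => |(i : Int) - (y : Int)|)) (fun v => v) = some m0 := by
          cases hm : PySem.List.min? (((List.range n).filter (fun y => decide (cs[y]! ∈ vowelA))).map
              (fun (y : Nat) => |(i : Int) - (y : Int)|)) (fun v => v) with
          | none => exact absurd ((PySem.List.min?_eq_none_iff _ _).mp hm) hmapne
          | some m => exact ⟨m, rfl⟩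
        rw [hm0]
        simp only [Option.getD_some]
        have hm0mem := PySem.List.min?_mem hm0
        obtain ⟨y, hyV, hgy⟩ := List.mem_map.mp hm0mem
        have hyn : y < n ∧ cs[y]! ∈ vowelA := by
          have := List.mem_filter.mp hyV
          simpa [List.mem_range] using this
        have hm0min : ∀ j, j < n → cs[j]! ∈ vowelA → m0 ≤ |(i : Int) - (j : Int)| := by
          intro j hj hjv
          have hjv' : cs[j] ∈ vowelA := by rwa [getElem!_pos cs j hj] at hjv
          have hjV : j ∈ (List.range n).filter (fun y => decide (cs[y]! ∈ vowelA)) := by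
            simp [List.mem_filter, hj, List.getElem?_eq_getElem hj, hjv']
          exact PySem.List.min?_isMin hm0 _ (List.mem_map.mpr ⟨j, hjV, rfl⟩)
        have hm0nonneg : 0 ≤ m0 := hgy ▸ abs_nonneg _
        -- m0 as a linear fact
        have habs : m0 = (i : Int) - (y : Int) ∨ m0 = (y : Int) - (i : Int) := by
          rcases abs_choice ((i : Int) - (y : Int)) with h | h
          · left; omega
          · right; rw [← hgy, h]; ring
        -- m0 is a lower bound on both sweep values
        have hfa_ge : m0 ≤ fa := by
          rcases f2 with ⟨j, hj, hjv, he⟩ | ⟨he, _⟩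
          · have h1 := hm0min j (by omega) hjv
            have h2 : |(i : Int) - (j : Int)| = (i : Int) - (j : Int) := abs_of_nonneg (by omega)
            omega
          · omega
        have hbb_ge : m0 ≤ bb := by
          rcases b2 with ⟨y', hy'1, hy'2, hy'v, he⟩ | ⟨he, _⟩
          · have h1 := hm0min y' hy'2 hy'v
            have h2 : |(i : Int) - (y' : Int)| = (y' : Int) - (i : Int) := by
              rw [abs_sub_comm]; exact abs_of_nonneg (by omega)
            omega
          · omega
        -- one of the sweeps attains m0's witness
        by_cases hyi : y ≤ i
        · have hfa_le := f1 y hyi hyn.2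
          omega
        · have hbb_le := b1 y (by omega) hyn.1 hyn.2
          omega
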